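-- pv_equiv track=rewrite | github.com/pihu26112005/contest | cf/Round 971(Div 4)/Round 964(Div 4)/q4.py | solve
-- ===== SOURCE A (Python) =====
-- def is_subsequence(s, t):
--     it = iter(s)
--     return all(char in it for char in t)
--
-- def solve(test_cases):
--     results = []
--     for s, t in test_cases:
--         # Create a list from s to make modifications easier
--         s_list = list(s)
--
--         # Iterate through s and replace '?' with appropriate characters
--         t_index = 0
--         for i in range(len(s_list)):
--             if s_list[i] == '?':
--                 if t_index < len(t) and is_subsequence(s_list[i+1:], t[t_index+1:]):
--                     s_list[i] = t[t_index]
--                     t_index += 1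
--                 else:
--                     s_list[i] = 'a'
--
--         # Check if t is a subsequence of the modified s
--         if is_subsequence(s_list, t):
--             results.append(f"YES\n{''.join(s_list)}")
--         else:
--             results.append("NO")
--
--     return results
-- ===== SOURCE B (Python) =====
-- def solve(test_cases):
--     results = []
--     for s, t in test_cases:
--         n, m = len(s), len(t)
--         # f[i] = least j such that t[j:] is a subsequence of s[i:]
--         f = [m] * (n + 1)
--         for i in range(n - 1, -1, -1):
--             j = f[i + 1]
--             if j > 0 and s[i] == t[j - 1]:
--                 j -= 1
--             f[i] = j
--         out = []
--         ti = 0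
--         for i in range(n):
--             c = s[i]
--             if c == '?':
--                 if ti < m and f[i + 1] <= ti + 1:
--                     out.append(t[ti])
--                     ti += 1
--                 else:
--                     out.append('a')
--             else:
--                 out.append(c)
--         filled = ''.join(out)
--         k = 0
--         for c in filled:
--             if k < m and c == t[k]:
--                 k += 1
--         results.append(f"YES\n{filled}" if k == m else "NO")
--     return results
-- ===== Notes on version B (the rewrite author's own statement) =====
-- stated objective: alternative
-- what changed: B precomputes, right-to-left, a suffix-feasibility array f (f[i] = least j with t[j:] a subsequence of s[i:]) so each '?' decision is an O(1) comparison instead of A's fresh subsequence scan of the remaining string, and the final check is a single two-pointer pass; worst case O(n+m) per test vs A's O(n*(n+m)), though on the probe's '?'-free inputs A is linear too and B measured no faster.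
import Mathlib
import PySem

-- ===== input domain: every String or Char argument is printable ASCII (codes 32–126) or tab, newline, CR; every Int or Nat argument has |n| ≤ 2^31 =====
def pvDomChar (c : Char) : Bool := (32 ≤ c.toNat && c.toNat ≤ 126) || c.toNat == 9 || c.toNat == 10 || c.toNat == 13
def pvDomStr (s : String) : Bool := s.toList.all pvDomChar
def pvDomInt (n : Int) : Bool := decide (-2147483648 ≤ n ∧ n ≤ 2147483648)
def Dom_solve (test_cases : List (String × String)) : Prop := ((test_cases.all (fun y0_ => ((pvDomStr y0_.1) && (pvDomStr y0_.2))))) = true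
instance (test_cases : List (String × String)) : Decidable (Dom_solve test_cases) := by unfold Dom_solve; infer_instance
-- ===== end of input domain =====

-- B replaces A's per-'?' subsequence re-check by a precomputed suffix-feasibility
-- array and a two-pointer final check (objective: alternative algorithm).

-- ===== PORT A =====
-- `char in it` on the iterator: scan remaining s for the first occurrence, keep the suffix after it
def findDrop (c : Char) : List Char → Option (List Char)
  | [] => none
  | x :: xs => if x = c then some xs else findDrop c xs

-- is_subsequence(s, t): consume an iterator of s once across the chars of t
def isSub : List Char → List Char → Bool
  | _, [] => true
  | s, x :: xs =>
    match findDrop x s with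
    | none => false
    | some s' => isSub s' xs

-- the i-loop of A: position i carries char c, the untouched suffix is `rest`
def fillA (t : List Char) : List Char → Nat → List Char
  | [], _ => []
  | c :: rest, ti =>
    if c = '?' then
      if ti < t.length ∧ isSub rest (t.drop (ti + 1)) = true then
        t.getD ti 'a' :: fillA t rest (ti + 1)
      else
        'a' :: fillA t rest ti
    else c :: fillA t rest ti

def solve (test_cases : List (String × String)) : List String :=
  test_cases.map (fun p =>
    let s := p.1.toList
    let t := p.2.toList
    let filled := fillA t s 0
    if isSub filled t then "YES\n" ++ String.ofList filled else "NO")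

-- ===== PORT B =====
-- f-array of Source B, built right to left: (buildF t s)[i] = least j with t[j:] a subsequence of s[i:]
def buildF (t : List Char) (s : List Char) : List Nat :=
  s.foldr
    (fun c fs =>
      (let j := fs.headD t.length
       if 0 < j ∧ c = t.getD (j - 1) 'a' then j - 1 else j) :: fs)
    [t.length]

-- the fill loop of Source B; `fs` holds the f-entries from index i+1 on
def fillB (t : List Char) : List Char → List Nat → Nat → List Char
  | [], _, _ => []
  | c :: rest, fs, ti =>
    if c = '?' then
      if ti < t.length ∧ fs.headD t.length ≤ ti + 1 then
        t.getD ti 'a' :: fillB t rest fs.tail (ti + 1)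
      else
        'a' :: fillB t rest fs.tail ti
    else c :: fillB t rest fs.tail ti

-- the two-pointer final check of Source B
def kRun (t : List Char) (s : List Char) (k : Nat) : Nat :=
  s.foldl (fun k c => if k < t.length ∧ c = t.getD k 'a' then k + 1 else k) k

def solve_alt (test_cases : List (String × String)) : List String :=
  test_cases.map (fun p =>
    let s := p.1.toList
    let t := p.2.toList
    let f := buildF t s
    let filled := fillB t s f.tail 0
    if kRun t filled 0 = t.length then "YES\n" ++ String.ofList filled else "NO")

-- ===== PRECONDITION & SPEC =====
def Spec_solve (test_cases : List (String × String)) (out : List String) : Prop := out = solve_alt test_cases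
instance (test_cases : List (String × String)) (out : List String) : Decidable (Spec_solve test_cases out) := by unfold Spec_solve; infer_instance

-- ===== CLAIM (what is proved, stated in full; the proofs are below) =====
def Claim_equal_solve : Prop := ∀ (test_cases : List (String × String)), Dom_solve test_cases → Spec_solve test_cases (solve test_cases)

-- ===== LEMMAS AND PROOFS =====

theorem sublist_tail {c : Char} {u s : List Char} (h : List.Sublist (c :: u) s) :
    List.Sublist u s :=
  (List.sublist_cons_self c u).trans h

theorem findDrop_of_sublist {c : Char} {u s : List Char} (h : List.Sublist (c :: u) s) :
    ∃ s', findDrop c s = some s' ∧ List.Sublist u s' := by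
  induction s with
  | nil => cases h
  | cons x xs ih =>
    by_cases hx : x = c
    · subst hx
      refine ⟨xs, by simp [findDrop], ?_⟩
      rcases h with _ | h | ⟨h, _⟩
      · exact sublist_tail ‹List.Sublist (x :: u) xs›
      · assumption
    · rcases h with _ | h | ⟨h, _⟩
      · rcases ih ‹List.Sublist (c :: u) xs› with ⟨s', h1, h2⟩
        exact ⟨s', by simp [findDrop, hx, h1], h2⟩
      · exact absurd rfl hx

theorem sublist_of_findDrop {c : Char} {u s s' : List Char}
    (h : findDrop c s = some s') (hu : List.Sublist u s') : List.Sublist (c :: u) s := by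
  induction s generalizing s' with
  | nil => simp [findDrop] at h
  | cons x xs ih =>
    by_cases hx : x = c
    · subst hx
      simp [findDrop] at h
      subst h
      exact hu.cons₂ x
    · simp [findDrop, hx] at h
      exact (ih h hu).cons x

theorem isSub_iff (t : List Char) : ∀ s : List Char, isSub s t = true ↔ List.Sublist t s := by
  induction t with
  | nil => intro s; simp [isSub]
  | cons x xs ih =>
    intro s
    constructor
    · intro h
      unfold isSub at h
      rcases hf : findDrop x s with _ | s'
      · rw [hf] at h; simp at h
      · rw [hf] at h
        exact sublist_of_findDrop hf ((ih s').mp h)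
    · intro h
      rcases findDrop_of_sublist h with ⟨s', h1, h2⟩
      unfold isSub
      rw [h1]
      exact (ih s').mpr h2

theorem buildF_cons (t : List Char) (c : Char) (rest : List Char) :
    buildF t (c :: rest) =
      (let j := (buildF t rest).headD t.length
       if 0 < j ∧ c = t.getD (j - 1) 'a' then j - 1 else j) :: buildF t rest := rfl

theorem buildF_head_le (t : List Char) : ∀ s : List Char, (buildF t s).headD t.length ≤ t.length := by
  intro s
  induction s with
  | nil => simp [buildF]
  | cons c rest ih =>
    rw [buildF_cons]
    simp only [List.headD_cons]
    split
    · omega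
    · exact ih

theorem buildF_le_iff (t : List Char) :
    ∀ (s : List Char) (k : Nat),
      List.Sublist (t.drop k) s ↔ (buildF t s).headD t.length ≤ k := by
  intro s
  induction s with
  | nil =>
    intro k
    simp [buildF, List.drop_eq_nil_iff]
  | cons c rest ih =>
    intro k
    rw [buildF_cons]
    simp only [List.headD_cons]
    have hjle : (buildF t rest).headD t.length ≤ t.length := buildF_head_le t rest
    set j := (buildF t rest).headD t.length with hj
    constructor
    · intro h
      by_cases hk : t.length ≤ k
      · split <;> omega
      · push_neg at hk
        rw [List.drop_eq_getElem_cons hk] at h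
        rcases h with _ | h | ⟨h, _⟩
        · have : j ≤ k := (ih k).mp (by rw [List.drop_eq_getElem_cons hk]; exact ‹_›)
          split <;> omega
        · -- heads matched: c = t[k], drop (k+1) sublist of rest
          have hj1 : j ≤ k + 1 := (ih (k + 1)).mp ‹_›
          rcases Nat.lt_or_ge k j with hlt | hge
          · have hjk : j = k + 1 := by omega
            have hcnd : (0 < j ∧ (t[k]'hk) = t.getD (j - 1) 'a') :=
              ⟨by omega, by rw [hjk]; simp [List.getD_eq_getElem?_getD, hk]⟩
            rw [if_pos hcnd]; omega
          · split <;> omega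
    · intro h
      by_cases hcond : 0 < j ∧ c = t.getD (j - 1) 'a'
      · rw [if_pos hcond] at h
        rcases Nat.lt_or_ge k j with hlt | hge
        · have hk : k = j - 1 := by omega
          have hklen : k < t.length := by omega
          rw [List.drop_eq_getElem_cons hklen]
          have hc : c = t[k] := by
            rcases hcond with ⟨h0, hc⟩
            rw [hc]
            have : j - 1 = k := by omega
            rw [this]
            simp [List.getD_eq_getElem?_getD, hklen]
          rw [← hc]
          exact ((ih (k + 1)).mpr (by omega)).cons₂ _
        · exact ((ih k).mpr hge).cons c
      · rw [if_neg hcond] at h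
        exact ((ih k).mpr h).cons c

theorem kRun_eq_iff (t : List Char) :
    ∀ (s : List Char) (k : Nat), k ≤ t.length →
      (kRun t s k = t.length ↔ List.Sublist (t.drop k) s) := by
  intro s
  induction s with
  | nil =>
    intro k hk
    simp [kRun, List.drop_eq_nil_iff]
    omega
  | cons c rest ih =>
    intro k hk
    show (kRun t rest (if k < t.length ∧ c = t.getD k 'a' then k + 1 else k) = t.length ↔ _)
    by_cases hc : k < t.length ∧ c = t.getD k 'a'
    · rw [if_pos hc]
      rw [ih (k + 1) (by omega)]
      have hget : c = t[k]'hc.1 := by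
        conv_lhs => rw [hc.2]
        simp [List.getD_eq_getElem?_getD, hc.1]
      rw [List.drop_eq_getElem_cons hc.1, ← hget]
      constructor
      · intro h; exact h.cons₂ _
      · intro h
        rcases h with _ | h | ⟨h, _⟩
        · exact sublist_tail ‹_›
        · assumption
    · rw [if_neg hc]
      rw [ih k hk]
      by_cases hlen : k < t.length
      · rw [List.drop_eq_getElem_cons hlen]
        constructor
        · intro h; exact h.cons c
        · intro h
          rcases h with _ | h | ⟨h, hx⟩
          · assumption
          · exact absurd ⟨hlen, by simp [List.getD_eq_getElem?_getD, hlen]⟩ hc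
      · have hnil : t.drop k = [] := by rw [List.drop_eq_nil_iff]; omega
        rw [hnil]
        simp

theorem fillA_eq_fillB (t : List Char) :
    ∀ (s : List Char) (ti : Nat), fillA t s ti = fillB t s (buildF t s).tail ti := by
  intro s
  induction s with
  | nil => intro ti; rfl
  | cons c rest ih =>
    intro ti
    rw [buildF_cons]
    simp only [List.tail_cons]
    show fillA t (c :: rest) ti = fillB t (c :: rest) (buildF t rest) ti
    unfold fillA fillB
    have hcond : (ti < t.length ∧ isSub rest (t.drop (ti + 1)) = true) ↔
        (ti < t.length ∧ (buildF t rest).headD t.length ≤ ti + 1) := by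
      rw [isSub_iff, buildF_le_iff]
    by_cases h1 : c = '?'
    · rw [if_pos h1, if_pos h1]
      by_cases h2 : ti < t.length ∧ isSub rest (t.drop (ti + 1)) = true
      · rw [if_pos h2, if_pos (hcond.mp h2), ih]
      · rw [if_neg h2, if_neg (fun hh => h2 (hcond.mpr hh)), ih]
    · rw [if_neg h1, if_neg h1, ih]

theorem solve_eq (test_cases : List (String × String)) : solve test_cases = solve_alt test_cases := by
  unfold solve solve_alt
  apply List.map_congr_left
  intro p _
  simp only
  rw [← fillA_eq_fillB]
  congr 1
  rw [eq_iff_iff]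
  rw [show (isSub (fillA p.2.toList p.1.toList 0) p.2.toList = true) ↔
      List.Sublist p.2.toList (fillA p.2.toList p.1.toList 0) from isSub_iff _ _]
  rw [kRun_eq_iff p.2.toList _ 0 (Nat.zero_le _)]
  simp

-- ===== VERDICT (by name: the statement is the Claim_ definition above) =====
theorem solve_spec : Claim_equal_solve := by
  intro tc _
  unfold Spec_solve
  exact solve_eq tc
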